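-- pv_equiv track=rewrite | github.com/WayanFWP/PSB | core/FilterLogic.py | detect_peak
-- ===== SOURCE A (Python) =====
-- def detect_peak(signal, threshold, peak_to_peak):
--     r_peaks = []
--     r_values = []
--
--     i = 0
--     while i < len(signal) - 1:
--         # Check if current point is above threshold and is a local maximum
--         if signal[i] > threshold and i > 0 and i < len(signal) - 1:
--             if signal[i] > signal[i-1] and signal[i] > signal[i+1]:
--                 r_peaks.append(i)
--                 r_values.append(signal[i])
--                 i += peak_to_peak  # Skip forward to look for next peak
--                 continue
--         i += 1
--
--     return r_peaks, r_values
-- ===== SOURCE B (Python) =====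
-- def detect_peak(sig, threshold, peak_to_peak):
--     n = len(sig)
--     # Pass 1: all local maxima above threshold (interior indices only).
--     candidates = [i for i in range(1, n - 1)
--                   if sig[i] > threshold
--                   and sig[i] > sig[i - 1]
--                   and sig[i] > sig[i + 1]]
--     # Pass 2: greedily enforce the refractory spacing.
--     r_peaks = []
--     r_values = []
--     next_allowed = 0
--     for c in candidates:
--         if c >= next_allowed:
--             r_peaks.append(c)
--             r_values.append(sig[c])
--             next_allowed = c + peak_to_peak
--     return r_peaks, r_values
-- ===== Notes on version B (the rewrite author's own statement) =====
-- stated objective: alternative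
-- what changed: Replaces A's single stateful while-loop with pointer jumps by two passes: collect all above-threshold local maxima, then greedily filter them with a next_allowed refractory bound.
import Mathlib
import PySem

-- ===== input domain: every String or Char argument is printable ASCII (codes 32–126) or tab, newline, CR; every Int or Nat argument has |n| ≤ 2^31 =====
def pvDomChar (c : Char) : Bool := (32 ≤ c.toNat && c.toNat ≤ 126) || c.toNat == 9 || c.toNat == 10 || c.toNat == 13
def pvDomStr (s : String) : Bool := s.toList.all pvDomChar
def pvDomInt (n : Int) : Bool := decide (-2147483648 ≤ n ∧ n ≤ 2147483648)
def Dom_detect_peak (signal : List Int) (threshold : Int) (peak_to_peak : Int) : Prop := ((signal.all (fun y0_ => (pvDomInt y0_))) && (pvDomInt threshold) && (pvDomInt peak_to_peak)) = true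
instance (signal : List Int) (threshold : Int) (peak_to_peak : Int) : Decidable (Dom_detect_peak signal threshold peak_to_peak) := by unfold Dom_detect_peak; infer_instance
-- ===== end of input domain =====

-- B replaces A's single stateful while-loop (with pointer jumps) by two passes:
-- collect all above-threshold interior local maxima, then greedily filter them with
-- a next_allowed refractory bound; same cost, different decomposition.

-- ===== PORT A =====
-- A's while-loop; fuel = signal.length bounds the iteration count (inside Pre_ the
-- index advances by at least 1 per iteration, or the loop never fires and advances by 1,
-- so the fuel is never exhausted there). Indices reached under the guards are in range,
-- so pyGetD with default 0 is exact there.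
def dpA_loop (signal : List Int) (threshold : Int) (peak_to_peak : Int) :
    Nat → Int → List Int → List Int → List Int × List Int
  | 0, _, rp, rv => (rp, rv)
  | fuel + 1, i, rp, rv =>
    if i < (signal.length : Int) - 1 then
      if PySem.List.pyGetD signal i 0 > threshold ∧ i > 0 ∧ i < (signal.length : Int) - 1 then
        if PySem.List.pyGetD signal i 0 > PySem.List.pyGetD signal (i - 1) 0 ∧
           PySem.List.pyGetD signal i 0 > PySem.List.pyGetD signal (i + 1) 0 then
          dpA_loop signal threshold peak_to_peak fuel (i + peak_to_peak)
            (rp ++ [i]) (rv ++ [PySem.List.pyGetD signal i 0])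
        else
          dpA_loop signal threshold peak_to_peak fuel (i + 1) rp rv
      else
        dpA_loop signal threshold peak_to_peak fuel (i + 1) rp rv
    else (rp, rv)

def detect_peak (signal : List Int) (threshold : Int) (peak_to_peak : Int) : List Int × List Int :=
  dpA_loop signal threshold peak_to_peak signal.length 0 [] []

-- ===== PORT B =====
-- the candidate test of Source B's comprehension
def dpB_cand (signal : List Int) (threshold : Int) (i : Int) : Bool :=
  decide (PySem.List.pyGetD signal i 0 > threshold) &&
  decide (PySem.List.pyGetD signal i 0 > PySem.List.pyGetD signal (i - 1) 0) &&
  decide (PySem.List.pyGetD signal i 0 > PySem.List.pyGetD signal (i + 1) 0)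

def detect_peak_alt (signal : List Int) (threshold : Int) (peak_to_peak : Int) : List Int × List Int :=
  let n : Int := signal.length
  let candidates := (PySem.List.pyRange 1 (n - 1) 1).filter (dpB_cand signal threshold)
  let st := candidates.foldl
    (fun (st : List Int × List Int × Int) c =>
      if st.2.2 ≤ c then (st.1 ++ [c], st.2.1 ++ [PySem.List.pyGetD signal c 0], c + peak_to_peak)
      else st)
    ([], [], 0)
  (st.1, st.2.1)

-- ===== PRECONDITION & SPEC =====
-- Pre_ excludes exactly the inputs on which A never returns: peak_to_peak ≤ 0 together
-- with at least one above-threshold interior local maximum makes A's while-loop run forever.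
def Pre_detect_peak (signal : List Int) (threshold : Int) (peak_to_peak : Int) : Prop :=
  1 ≤ peak_to_peak ∨
    ∀ i ∈ PySem.List.pyRange 1 ((signal.length : Int) - 1) 1, dpB_cand signal threshold i = false
instance (signal : List Int) (threshold : Int) (peak_to_peak : Int) : Decidable (Pre_detect_peak signal threshold peak_to_peak) := by unfold Pre_detect_peak; infer_instance

def pvWitness_detect_peak : List Int × Int × Int := ([0, 5, 0, 7, 1, 9, 0], 1, 2)

def Spec_detect_peak (signal : List Int) (threshold : Int) (peak_to_peak : Int) (out : List Int × List Int) : Prop := out = detect_peak_alt signal threshold peak_to_peak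
instance (signal : List Int) (threshold : Int) (peak_to_peak : Int) (out : List Int × List Int) : Decidable (Spec_detect_peak signal threshold peak_to_peak out) := by unfold Spec_detect_peak; infer_instance

-- ===== CLAIM (what is proved, stated in full; the proofs are below) =====
def Claim_equal_detect_peak : Prop := ∀ (signal : List Int) (threshold : Int) (peak_to_peak : Int), Dom_detect_peak signal threshold peak_to_peak → Pre_detect_peak signal threshold peak_to_peak → Spec_detect_peak signal threshold peak_to_peak (detect_peak signal threshold peak_to_peak)

-- ===== LEMMAS AND PROOFS =====

-- the second pass of B, in cons form (the foldl of the port appends; see dpSel_foldl)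
def dpSel (signal : List Int) (peak_to_peak : Int) : List Int → Int → List Int × List Int
  | [], _ => ([], [])
  | c :: cs, na =>
    if na ≤ c then
      let r := dpSel signal peak_to_peak cs (c + peak_to_peak)
      (c :: r.1, PySem.List.pyGetD signal c 0 :: r.2)
    else dpSel signal peak_to_peak cs na

-- remaining candidates from index i on
def dpC (signal : List Int) (threshold : Int) (i : Int) : List Int :=
  (PySem.List.pyRange i ((signal.length : Int) - 1) 1).filter (dpB_cand signal threshold)

theorem dpC_nil (signal : List Int) (threshold : Int) (i : Int)
    (h : (signal.length : Int) - 1 ≤ i) : dpC signal threshold i = [] := by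
  simp [dpC, PySem.List.pyRange_one_eq_nil h]

theorem dpC_cons (signal : List Int) (threshold : Int) (i : Int)
    (h : i < (signal.length : Int) - 1) :
    dpC signal threshold i =
      if dpB_cand signal threshold i then i :: dpC signal threshold (i + 1)
      else dpC signal threshold (i + 1) := by
  rw [dpC, PySem.List.pyRange_one_cons h, List.filter_cons]
  split <;> rfl

theorem dpSel_foldl (signal : List Int) (peak_to_peak : Int) :
    ∀ (l rp rv : List Int) (na : Int),
      (l.foldl
        (fun (st : List Int × List Int × Int) c =>
          if st.2.2 ≤ c then (st.1 ++ [c], st.2.1 ++ [PySem.List.pyGetD signal c 0], c + peak_to_peak)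
          else st)
        (rp, rv, na)).1 = rp ++ (dpSel signal peak_to_peak l na).1 ∧
      (l.foldl
        (fun (st : List Int × List Int × Int) c =>
          if st.2.2 ≤ c then (st.1 ++ [c], st.2.1 ++ [PySem.List.pyGetD signal c 0], c + peak_to_peak)
          else st)
        (rp, rv, na)).2.1 = rv ++ (dpSel signal peak_to_peak l na).2 := by
  intro l
  induction l with
  | nil => intro rp rv na; simp [dpSel]
  | cons c cs ih =>
    intro rp rv na
    by_cases h : na ≤ c
    · simpa [dpSel, h] using ih (rp ++ [c]) (rv ++ [PySem.List.pyGetD signal c 0]) (c + peak_to_peak)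
    · simpa [dpSel, h] using ih rp rv na

theorem dpSel_skip (signal : List Int) (threshold : Int) (peak_to_peak : Int) :
    ∀ (d : Nat) (j na : Int), na = j + d →
      dpSel signal peak_to_peak (dpC signal threshold j) na =
      dpSel signal peak_to_peak (dpC signal threshold na) na := by
  intro d
  induction d with
  | zero => intro j na h; simp [h]
  | succ d ih =>
    intro j na h
    by_cases hj : j < (signal.length : Int) - 1
    · rw [dpC_cons signal threshold j hj]
      have hlt : ¬ na ≤ j := by omega
      have step : dpSel signal peak_to_peak
          (if dpB_cand signal threshold j then j :: dpC signal threshold (j + 1)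
           else dpC signal threshold (j + 1)) na
          = dpSel signal peak_to_peak (dpC signal threshold (j + 1)) na := by
        split
        · simp [dpSel, hlt]
        · rfl
      rw [step, ih (j + 1) na (by omega)]
    · rw [dpC_nil signal threshold j (by omega), dpC_nil signal threshold na (by omega)]
  
theorem dpC_mem_ge (signal : List Int) (threshold : Int) (j c : Int)
    (h : c ∈ dpC signal threshold j) : j ≤ c := by
  have := List.mem_of_mem_filter h
  rw [PySem.List.mem_pyRange_one] at this
  exact this.1

theorem dpSel_na_congr (signal : List Int) (peak_to_peak : Int) (l : List Int) (na na' : Int)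
    (h1 : na ≤ na') (h2 : ∀ c ∈ l, na' ≤ c) :
    dpSel signal peak_to_peak l na = dpSel signal peak_to_peak l na' := by
  cases l with
  | nil => rfl
  | cons c cs =>
    have hc := h2 c (by simp)
    simp [dpSel, show na ≤ c by omega, hc]

theorem dpA_main (signal : List Int) (threshold : Int) (peak_to_peak : Int)
    (hyp : 1 ≤ peak_to_peak ∨
      ∀ x, 1 ≤ x → x < (signal.length : Int) - 1 → dpB_cand signal threshold x = false) :
    ∀ (fuel : Nat) (i : Int) (rp rv : List Int), 1 ≤ i →
      ((signal.length : Int) - 1 - i).toNat ≤ fuel →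
      dpA_loop signal threshold peak_to_peak fuel i rp rv =
        (rp ++ (dpSel signal peak_to_peak (dpC signal threshold i) i).1,
         rv ++ (dpSel signal peak_to_peak (dpC signal threshold i) i).2) := by
  intro fuel
  induction fuel with
  | zero =>
    intro i rp rv hi hf
    rw [dpC_nil signal threshold i (by omega)]
    simp [dpA_loop, dpSel]
  | succ fuel ih =>
    intro i rp rv hi hf
    by_cases hlt : i < (signal.length : Int) - 1
    · by_cases hc : dpB_cand signal threshold i = true
      · -- firing case: peak_to_peak ≥ 1 (the no-candidate disjunct contradicts hc)
        have hp : 1 ≤ peak_to_peak := by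
          rcases hyp with h | h
          · exact h
          · exact absurd hc (by simp [h i hi hlt])
        have hc' := hc
        simp only [dpB_cand, Bool.and_eq_true, decide_eq_true_eq] at hc'
        obtain ⟨⟨h1, h2⟩, h3⟩ := hc'
        rw [dpA_loop]
        rw [if_pos hlt, if_pos ⟨h1, by omega, hlt⟩, if_pos ⟨h2, h3⟩]
        rw [ih (i + peak_to_peak) (rp ++ [i]) (rv ++ [PySem.List.pyGetD signal i 0])
              (by omega) (by omega)]
        rw [dpC_cons signal threshold i hlt, if_pos hc]
        have hskip := dpSel_skip signal threshold peak_to_peak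
          (peak_to_peak - 1).toNat (i + 1) (i + peak_to_peak) (by omega)
        simp [dpSel, hskip]
      · -- non-firing case: both programs move from i to i+1
        have hcombined : dpA_loop signal threshold peak_to_peak (fuel + 1) i rp rv =
            dpA_loop signal threshold peak_to_peak fuel (i + 1) rp rv := by
          rw [dpA_loop, if_pos hlt]
          split_ifs with hA hB
          · exact absurd (by
              simp only [dpB_cand, Bool.and_eq_true, decide_eq_true_eq]
              exact ⟨⟨hA.1, hB.1⟩, hB.2⟩) hc
          · rfl
          · rfl
        rw [hcombined, ih (i + 1) rp rv (by omega) (by omega),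
            dpC_cons signal threshold i hlt, if_neg hc,
            dpSel_na_congr signal peak_to_peak (dpC signal threshold (i + 1)) i (i + 1)
              (by omega) (fun c hcm => dpC_mem_ge signal threshold (i + 1) c hcm)]
    · rw [dpC_nil signal threshold i (by omega), dpA_loop, if_neg hlt]
      simp [dpSel]

theorem detect_peak_spec' (signal : List Int) (threshold : Int) (peak_to_peak : Int)
    (hpre : Pre_detect_peak signal threshold peak_to_peak) :
    detect_peak signal threshold peak_to_peak = detect_peak_alt signal threshold peak_to_peak := by
  have hyp : 1 ≤ peak_to_peak ∨
      ∀ x, 1 ≤ x → x < (signal.length : Int) - 1 → dpB_cand signal threshold x = false := by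
    rcases hpre with h | h
    · exact Or.inl h
    · exact Or.inr (fun x h1 h2 => h x (by rw [PySem.List.mem_pyRange_one]; exact ⟨h1, h2⟩))
  have hB : detect_peak_alt signal threshold peak_to_peak =
      dpSel signal peak_to_peak (dpC signal threshold 1) 0 := by
    obtain ⟨e1, e2⟩ := dpSel_foldl signal peak_to_peak
      ((PySem.List.pyRange 1 ((signal.length : Int) - 1) 1).filter (dpB_cand signal threshold))
      [] [] 0
    simp only [detect_peak_alt]
    rw [e1, e2]
    simp [dpC]
  have hmem : ∀ c ∈ dpC signal threshold 1, (1 : Int) ≤ c := by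
    intro c hcm
    have := List.mem_of_mem_filter hcm
    rw [PySem.List.mem_pyRange_one] at this
    exact this.1
  rw [hB, dpSel_na_congr signal peak_to_peak _ 0 1 (by omega) hmem]
  by_cases hlen : (signal.length : Int) - 1 ≤ 0
  · have hC : dpC signal threshold 1 = [] := dpC_nil signal threshold 1 (by omega)
    rw [hC]
    cases signal with
    | nil => simp [detect_peak, dpA_loop, dpSel]
    | cons a t =>
      have : t = [] := by
        cases t with
        | nil => rfl
        | cons b u => simp at hlen; omega
      subst this
      simp [detect_peak, dpA_loop, dpSel]
  · -- signal.length ≥ 2: first step of A goes from i = 0 to i = 1 (the i > 0 test fails)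
    replace hlen : 0 < (signal.length : Int) - 1 := by omega
    obtain ⟨fuel, hfuel⟩ : ∃ f, signal.length = f + 1 := by
      cases signal with
      | nil => simp at hlen
      | cons a t => exact ⟨t.length, by simp⟩
    rw [detect_peak, hfuel, dpA_loop, if_pos (by omega),
        if_neg (by intro h; omega)]
    have h01 : (0 : Int) + 1 = 1 := by norm_num
    rw [h01]
    rw [dpA_main signal threshold peak_to_peak hyp fuel 1 [] [] le_rfl (by omega)]
    simp

-- ===== VERDICT (by name: the statement is the Claim_ definition above) =====
theorem detect_peak_spec : Claim_equal_detect_peak := by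
  intro signal threshold peak_to_peak _ hpre
  unfold Spec_detect_peak
  exact detect_peak_spec' signal threshold peak_to_peak hpre
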